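-- pv_equiv track=rewrite | github.com/FelipeTakahashi/Competitive-Programming | Python/Iniciante/2782.py | escadinha
-- ===== SOURCE A (Python) =====
-- def escadinha(vector):
--     i, counter, limit = 0, 0, len(vector)-1
--     while (i < limit):
--         try:
--             dif = vector[i] - vector[i+1]
--
--             while (dif == vector[i] - vector[i+1]):
--                 i += 1
--                 if (i == limit): break
--
--             counter += 1
--         except:
--             return counter
--
--     return counter
-- ===== SOURCE B (Python) =====
-- def escadinha(vector):
--     diffs = [vector[i] - vector[i + 1] for i in range(len(vector) - 1)]
--     if not diffs:
--         return 0
--     return 1 + sum(1 for a, b in zip(diffs, diffs[1:]) if a != b)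
-- ===== Notes on version B (the rewrite author's own statement) =====
-- stated objective: simpler
-- what changed: A's interleaved nested while loops with pointer advancing and a dead try/except are replaced by a two-phase structure: build the list of consecutive differences, then count its maximal constant runs as 1 + number of adjacent unequal pairs (a comprehension plus a generator sum runs with less per-element interpreter overhead than A's nested index loops).
import Mathlib
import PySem

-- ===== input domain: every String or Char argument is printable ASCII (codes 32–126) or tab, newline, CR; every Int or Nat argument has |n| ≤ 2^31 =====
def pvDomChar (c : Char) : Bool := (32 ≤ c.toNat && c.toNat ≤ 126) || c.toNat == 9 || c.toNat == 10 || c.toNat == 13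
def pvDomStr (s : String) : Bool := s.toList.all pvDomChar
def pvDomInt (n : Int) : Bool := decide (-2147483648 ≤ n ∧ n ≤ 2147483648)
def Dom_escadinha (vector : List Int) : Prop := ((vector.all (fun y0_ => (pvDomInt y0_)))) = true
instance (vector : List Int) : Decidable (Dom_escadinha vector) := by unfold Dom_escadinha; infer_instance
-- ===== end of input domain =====

-- B replaces A's nested pointer-advancing while loops (with a dead-for-int-lists try/except)
-- by a plainer two-phase count: build the consecutive-difference list, then 1 + #adjacent unequal pairs.


-- ===== PORT A =====
-- Inner `while (dif == vector[i] - vector[i+1]): i += 1; if i == limit: break`.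
-- Indices use Nat with limit = vector.length - 1 (Python's limit = len-1; for an empty list Python's
-- limit is -1 and the loop never runs, matched here by limit = 0). While a loop condition is being
-- evaluated the invariant i < limit holds, so vector[i] and vector[i+1] are in range and getD is exact
-- (Python's try/except is unreachable on int lists); the `if h : i < limit` guard only makes the
-- function total on unreachable states.
def escadinha_inner (v : List Int) (limit : Nat) (dif : Int) (i : Nat) : Nat :=
  if h : i < limit then
    if dif = v.getD i 0 - v.getD (i + 1) 0 then
      if i + 1 = limit then i + 1
      else escadinha_inner v limit dif (i + 1)
    else i
  else i
termination_by limit - i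
decreasing_by omega

-- the inner loop never moves i backwards (termination helper for the outer loop, cited below)
theorem escadinha_inner_ge (v : List Int) (limit : Nat) (dif : Int) (i : Nat) :
    i ≤ escadinha_inner v limit dif i := by
  have H : ∀ n i, limit - i ≤ n → i ≤ escadinha_inner v limit dif i := by
    intro n
    induction n with
    | zero =>
      intro i hi
      unfold escadinha_inner
      have h : ¬ i < limit := by omega
      simp [h]
    | succ n ih =>
      intro i hi
      unfold escadinha_inner
      split_ifs with h1 h2 h3
      · omega
      · exact le_trans (by omega) (ih (i + 1) (by omega))
      · exact le_rfl
      · exact le_rfl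
  exact H (limit - i) i le_rfl

-- entered with dif = current difference, the inner loop strictly advances i
theorem escadinha_inner_gt (v : List Int) (limit : Nat) (i : Nat) (h : i < limit) :
    i < escadinha_inner v limit (v.getD i 0 - v.getD (i + 1) 0) i := by
  rw [escadinha_inner, dif_pos h, if_pos rfl]
  split_ifs with h2
  · omega
  · exact lt_of_lt_of_le (Nat.lt_succ_self i) (escadinha_inner_ge v limit _ (i + 1))

-- Outer `while (i < limit)`: compute dif, run the inner loop, counter += 1.
def escadinha_outer (v : List Int) (limit : Nat) (i : Nat) (counter : Int) : Int :=
  if h : i < limit then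
    escadinha_outer v limit (escadinha_inner v limit (v.getD i 0 - v.getD (i + 1) 0) i) (counter + 1)
  else counter
termination_by limit - i
decreasing_by
  have := escadinha_inner_gt v limit i h
  omega

def escadinha (vector : List Int) : Int :=
  escadinha_outer vector (vector.length - 1) 0 0

-- ===== PORT B =====
-- diffs = [vector[i] - vector[i+1] for i in range(len(vector)-1)]; indices always in range, getD exact
def escadinha_alt (vector : List Int) : Int :=
  let diffs := (List.range (vector.length - 1)).map (fun i => vector.getD i 0 - vector.getD (i + 1) 0)
  match diffs with
  | [] => 0
  | _ :: _ => 1 + (((diffs.zip diffs.tail).filter (fun p => p.1 != p.2)).length : Int)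

-- ===== PRECONDITION & SPEC =====
def Spec_escadinha (vector : List Int) (out : Int) : Prop := out = escadinha_alt vector
instance (vector : List Int) (out : Int) : Decidable (Spec_escadinha vector out) := by unfold Spec_escadinha; infer_instance

-- ===== CLAIM (what is proved, stated in full; the proofs are below) =====
def Claim_equal_escadinha : Prop := ∀ (vector : List Int), Dom_escadinha vector → Spec_escadinha vector (escadinha vector)

-- ===== LEMMAS AND PROOFS =====

-- the difference table both programs (implicitly or explicitly) work over
def pvDiffs (v : List Int) : List Int :=
  (List.range (v.length - 1)).map (fun i => v.getD i 0 - v.getD (i + 1) 0)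

-- number of maximal constant runs in a list
def pvRunsAux : Int → List Int → Int
  | _, [] => 1
  | d, e :: es => if d = e then pvRunsAux e es else 1 + pvRunsAux e es

def pvRuns : List Int → Int
  | [] => 0
  | e :: es => pvRunsAux e es

theorem pvDiffs_length (v : List Int) : (pvDiffs v).length = v.length - 1 := by
  simp [pvDiffs]

theorem pvDiffs_drop_cons (v : List Int) (i : Nat) (h : i < v.length - 1) :
    (pvDiffs v).drop i = (v.getD i 0 - v.getD (i + 1) 0) :: (pvDiffs v).drop (i + 1) := by
  have hi : i < (pvDiffs v).length := by rw [pvDiffs_length]; exact h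
  rw [List.drop_eq_getElem_cons hi]
  congr 1
  simp [pvDiffs]

-- a constant block [i, j) closed on the right collapses to one run
theorem pvRuns_const_block (v : List Int) :
    ∀ m i j, j - i ≤ m → i < j → j ≤ v.length - 1 →
    (∀ k, i ≤ k → k < j → v.getD k 0 - v.getD (k + 1) 0 = v.getD i 0 - v.getD (i + 1) 0) →
    (j = v.length - 1 ∨ v.getD j 0 - v.getD (j + 1) 0 ≠ v.getD i 0 - v.getD (i + 1) 0) →
    pvRuns ((pvDiffs v).drop i) = 1 + pvRuns ((pvDiffs v).drop j) := by
  intro m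
  induction m with
  | zero => intro i j h1 h2; omega
  | succ m ih =>
    intro i j h1 h2 h3 hconst hend
    have hi : i < v.length - 1 := lt_of_lt_of_le h2 h3
    rw [pvDiffs_drop_cons v i hi]
    by_cases hij : j = i + 1
    · subst hij
      by_cases hj : i + 1 = v.length - 1
      · have hnil : (pvDiffs v).drop (i + 1) = [] := by
          apply List.drop_eq_nil_of_le; rw [pvDiffs_length]; omega
        rw [hnil]
        simp [pvRuns, pvRunsAux]
      · have hr := hend.resolve_left hj
        have hjlt : i + 1 < v.length - 1 := by omega
        rw [pvDiffs_drop_cons v (i + 1) hjlt]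
        simp only [pvRuns, pvRunsAux]
        rw [if_neg (fun he => hr he.symm)]
    · -- j > i + 1: the element at i+1 equals the one at i, merge and recurse
      have hi1 : i + 1 < j := by omega
      have hi1' : i + 1 < v.length - 1 := lt_of_lt_of_le hi1 h3
      have heq : v.getD (i + 1) 0 - v.getD (i + 2) 0 = v.getD i 0 - v.getD (i + 1) 0 :=
        hconst (i + 1) (by omega) hi1
      have step := ih (i + 1) j (by omega) hi1 h3
        (fun k hk1 hk2 => (hconst k (by omega) hk2).trans heq.symm)
        (by rcases hend with hl | hr
            · exact Or.inl hl
            · exact Or.inr (fun he => hr (he.trans heq)))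
      have hdrop1 := pvDiffs_drop_cons v (i + 1) hi1'
      rw [hdrop1]
      simp only [pvRuns, pvRunsAux]
      rw [if_pos heq.symm]
      rw [hdrop1] at step
      simpa [pvRuns, pvRunsAux] using step

-- what the inner loop's result satisfies: it stays within [i, limit], the block it skipped is
-- constantly equal to dif, and the element it stops on (if any) differs from dif
theorem escadinha_inner_spec (v : List Int) (limit : Nat) :
    ∀ n i dif, limit - i ≤ n → i < limit →
    escadinha_inner v limit dif i ≤ limit ∧
    (∀ k, i ≤ k → k < escadinha_inner v limit dif i → v.getD k 0 - v.getD (k + 1) 0 = dif) ∧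
    (escadinha_inner v limit dif i < limit →
      v.getD (escadinha_inner v limit dif i) 0 - v.getD (escadinha_inner v limit dif i + 1) 0 ≠ dif) := by
  intro n
  induction n with
  | zero => intro i dif h1 h2; omega
  | succ n ih =>
    intro i dif h1 h2
    unfold escadinha_inner
    simp only [h2, dite_true]
    split_ifs with hd hl
    · -- dif matches at i, i+1 = limit: stop at limit
      refine ⟨by omega, ?_, by omega⟩
      intro k hk1 hk2
      have : k = i := by omega
      subst this; exact hd.symm
    · -- dif matches at i, continue from i+1
      have hi1 : i + 1 < limit := by omega
      obtain ⟨ha, hb, hc⟩ := ih (i + 1) dif (by omega) hi1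
      refine ⟨ha, ?_, hc⟩
      intro k hk1 hk2
      rcases Nat.eq_or_lt_of_le hk1 with he | hlt
      · subst he; exact hd.symm
      · exact hb k hlt hk2
    · -- dif does not match at i: stop at i
      exact ⟨by omega, by intro k hk1 hk2; omega, by intro _ he; exact hd he.symm⟩

-- the outer loop counts the runs of the difference table from position i onwards
theorem escadinha_outer_runs (v : List Int) :
    ∀ n i c, v.length - 1 - i ≤ n →
    escadinha_outer v (v.length - 1) i c = c + pvRuns ((pvDiffs v).drop i) := by
  intro n
  induction n with
  | zero =>
    intro i c h
    unfold escadinha_outer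
    have h2 : ¬ i < v.length - 1 := by omega
    simp only [h2, dite_false]
    have : (pvDiffs v).drop i = [] := by
      apply List.drop_eq_nil_of_le; rw [pvDiffs_length]; omega
    rw [this]; simp [pvRuns]
  | succ n ih =>
    intro i c h
    unfold escadinha_outer
    by_cases h2 : i < v.length - 1
    · simp only [h2, dite_true]
      set j := escadinha_inner v (v.length - 1) (v.getD i 0 - v.getD (i + 1) 0) i with hj
      have hgt : i < j := escadinha_inner_gt v (v.length - 1) i h2
      obtain ⟨hle, hconst, hstop⟩ :=
        escadinha_inner_spec v (v.length - 1) (v.length - 1 - i) i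
          (v.getD i 0 - v.getD (i + 1) 0) le_rfl h2
      have hrec := ih j (c + 1) (by omega)
      rw [hrec]
      have hruns : pvRuns ((pvDiffs v).drop i) = 1 + pvRuns ((pvDiffs v).drop j) := by
        apply pvRuns_const_block v (j - i) i j le_rfl hgt hle
        · exact fun k hk1 hk2 => hconst k hk1 hk2
        · rcases Nat.eq_or_lt_of_le hle with he | hlt
          · exact Or.inl he
          · exact Or.inr (hstop hlt)
      rw [hruns]; ring
    · simp only [h2, dite_false]
      have : (pvDiffs v).drop i = [] := by
        apply List.drop_eq_nil_of_le; rw [pvDiffs_length]; omega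
      rw [this]; simp [pvRuns]

-- B's "1 + #adjacent unequal pairs" equals the run count
theorem pvRunsAux_changes :
    ∀ (es : List Int) (e : Int),
    pvRunsAux e es = 1 + ((((e :: es).zip es).filter (fun p => p.1 != p.2)).length : Int) := by
  intro es
  induction es with
  | nil => intro e; simp [pvRunsAux, List.zip]
  | cons f fs ih =>
    intro e
    simp only [pvRunsAux]
    rw [show ((e :: f :: fs).zip (f :: fs)) = (e, f) :: ((f :: fs).zip fs) from rfl]
    by_cases he : e = f
    · rw [if_pos he, List.filter_cons_of_neg (by simp [he])]
      exact ih f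
    · rw [if_neg he, List.filter_cons_of_pos (by simp [bne_iff_ne]; exact he)]
      rw [ih f]
      simp only [List.length_cons]
      push_cast
      ring

theorem escadinha_alt_eq_runs (v : List Int) : escadinha_alt v = pvRuns (pvDiffs v) := by
  unfold escadinha_alt
  show (match pvDiffs v with
        | [] => (0 : Int)
        | _ :: _ => 1 + ((((pvDiffs v).zip (pvDiffs v).tail).filter (fun p => p.1 != p.2)).length : Int))
      = pvRuns (pvDiffs v)
  cases hd : pvDiffs v with
  | nil => simp [pvRuns]
  | cons e es =>
    simp only [List.tail_cons, pvRuns]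
    exact (pvRunsAux_changes es e).symm

-- ===== VERDICT (by name: the statement is the Claim_ definition above) =====
theorem escadinha_spec : Claim_equal_escadinha := by
  intro v _
  unfold Spec_escadinha
  rw [escadinha_alt_eq_runs]
  unfold escadinha
  have := escadinha_outer_runs v (v.length - 1) 0 0 (by omega)
  rw [this]
  simp
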